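-- pv_equiv track=rewrite | github.com/pypi-data/pypi-mirror-345 | packages/pip_inside/pip_inside-0.2.11.tar.gz/pip_inside-0.2.11/pip_inside/utils/versions.py | _add_version_position
-- ===== SOURCE A (Python) =====
-- def _add_version_position(lines: list):
--     saw_contents = False
--     for i, line in enumerate(lines):
--         line = line.strip()
--         if not line:
--             if not saw_contents:
--                 continue
--             else:
--                 return i
--
--         saw_contents = True
--         if line.startswith('#'):
--             continue
--         return i
--     return len(lines)
-- ===== SOURCE B (Python) =====
-- def _add_version_position(lines: list):
--     # Two phases instead of a saw_contents flag: skip leading blank lines,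
--     # then return the first line that is blank or not a '#' comment.
--     i = 0
--     while i < len(lines) and not lines[i].strip():
--         i += 1
--     for j, line in enumerate(lines[i:], start=i):
--         s = line.strip()
--         if not s or not s.startswith('#'):
--             return j
--     return len(lines)
-- ===== Notes on version B (the rewrite author's own statement) =====
-- stated objective: simpler
-- what changed: Replaces the saw_contents flag with a two-phase decomposition: first skip the leading blank lines, then scan the rest for the first blank or non-comment line.
import Mathlib
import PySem

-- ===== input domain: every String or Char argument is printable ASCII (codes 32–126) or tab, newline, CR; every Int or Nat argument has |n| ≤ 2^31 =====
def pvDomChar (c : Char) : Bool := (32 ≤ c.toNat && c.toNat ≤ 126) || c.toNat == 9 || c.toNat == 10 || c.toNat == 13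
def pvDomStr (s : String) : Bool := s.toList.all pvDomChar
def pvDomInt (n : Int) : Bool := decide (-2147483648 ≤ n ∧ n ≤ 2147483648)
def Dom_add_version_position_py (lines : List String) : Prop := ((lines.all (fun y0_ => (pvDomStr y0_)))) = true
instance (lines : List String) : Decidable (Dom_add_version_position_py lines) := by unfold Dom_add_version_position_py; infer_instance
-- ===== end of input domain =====

-- B replaces A's saw_contents flag with a two-phase scan (skip leading blanks, then find
-- the first blank or non-comment line); objective: simpler. Same cost, A = B everywhere.

-- ===== PORT A =====
-- A's single loop over enumerate(lines) with the saw_contents flag; i counts position,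
-- the base case (list exhausted) is Python's final 'return len(lines)' (i then = len).
def pvALoop : List String → Int → Bool → Int
  | [], i, _ => i
  | l :: rest, i, saw =>
    let s := PySem.Str.strip l
    if s = "" then
      if saw = false then pvALoop rest (i + 1) saw else i
    else
      if PySem.Str.startswith s "#" = true then pvALoop rest (i + 1) true
      else i

def add_version_position_py (lines : List String) : Int := pvALoop lines 0 false

-- ===== PORT B =====
-- phase 1: the while loop skipping leading blank lines (returns the counter and lines[i:])
def pvBFind : List String → Int → Int × List String
  | [], i => (i, [])
  | l :: rest, i =>
    if PySem.Str.strip l = "" then pvBFind rest (i + 1) else (i, l :: rest)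

-- phase 2: the for loop over enumerate(lines[i:], start=i)
def pvBScan : List String → Int → Int
  | [], j => j
  | l :: rest, j =>
    let s := PySem.Str.strip l
    if s = "" ∨ ¬ PySem.Str.startswith s "#" = true then j else pvBScan rest (j + 1)

def add_version_position_py_alt (lines : List String) : Int :=
  let p := pvBFind lines 0
  pvBScan p.2 p.1

-- ===== PRECONDITION & SPEC =====
def Spec_add_version_position_py (lines : List String) (out : Int) : Prop := out = add_version_position_py_alt lines
instance (lines : List String) (out : Int) : Decidable (Spec_add_version_position_py lines out) := by unfold Spec_add_version_position_py; infer_instance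

-- ===== CLAIM (what is proved, stated in full; the proofs are below) =====
def Claim_equal_add_version_position_py : Prop := ∀ (lines : List String), Dom_add_version_position_py lines → Spec_add_version_position_py lines (add_version_position_py lines)

-- ===== LEMMAS AND PROOFS =====
-- Once the flag is set, A's remaining loop is exactly B's phase-2 scan.
theorem pvALoop_true_eq_scan (xs : List String) : ∀ i : Int, pvALoop xs i true = pvBScan xs i := by
  induction xs with
  | nil => intro i; rfl
  | cons l rest ih =>
    intro i
    simp only [pvALoop, pvBScan]
    by_cases h : PySem.Str.strip l = ""
    · simp [h]
    · by_cases hs : PySem.Chars.startswith (PySem.Chars.strip l.toList) ['#'] = true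
      · simp [h, hs, ih]
      · simp [h, hs]

-- With the flag unset, A's loop is B's two phases.
theorem pvALoop_false_eq (xs : List String) : ∀ i : Int,
    pvALoop xs i false = pvBScan (pvBFind xs i).2 (pvBFind xs i).1 := by
  induction xs with
  | nil => intro i; rfl
  | cons l rest ih =>
    intro i
    simp only [pvALoop, pvBFind]
    by_cases h : PySem.Str.strip l = ""
    · simp [h, ih]
    · by_cases hs : PySem.Chars.startswith (PySem.Chars.strip l.toList) ['#'] = true
      · simp [h, hs, pvBScan, pvALoop_true_eq_scan]
      · simp [h, hs, pvBScan]

-- ===== VERDICT (by name: the statement is the Claim_ definition above) =====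
theorem add_version_position_py_spec : Claim_equal_add_version_position_py := by
  intro lines _
  unfold Spec_add_version_position_py add_version_position_py add_version_position_py_alt
  exact pvALoop_false_eq lines 0
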